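-- pv_equiv track=rewrite | github.com/MohitBhimrajka/v3_NESIC | app/core/pdf/generator.py | _extract_intro
-- ===== SOURCE A (Python) =====
-- def _extract_intro(content: str) -> str:
--     """Extract the first paragraph for use as an introduction/summary."""
--     # Find the first non-heading paragraph
--     lines = content.split('\n')
--     paragraph = []
--
--     for line in lines:
--         # Skip lines that look like headings or YAML markers
--         if line.startswith('#') or line.startswith('---'):
--             continue
--
--         # If we find a non-empty line, start collecting
--         if line.strip() and not paragraph:
--             paragraph.append(line.strip())
--         # Add more lines if we've already started a paragraph
--         elif paragraph and line.strip():
--             paragraph.append(line.strip())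
--         # Break when we hit an empty line after collecting some content
--         elif paragraph and not line.strip():
--             break
--
--     intro = ' '.join(paragraph)
--
--     # If the intro is very long, truncate it
--     max_length = 200
--     if len(intro) > max_length:
--         intro = intro[:max_length].rsplit(' ', 1)[0] + '...'
--
--     return intro
-- ===== SOURCE B (Python) =====
-- def _extract_intro(content: str) -> str:
--     """Extract the first paragraph for use as an introduction/summary."""
--     # Keep non-heading/non-YAML-marker lines (tested on the raw line), stripped.
--     kept = [l.strip() for l in content.split('\n')
--             if not (l.startswith('#') or l.startswith('---'))]
--     n = len(kept)
--     # First contiguous block of non-empty kept lines: kept[i:j].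
--     i = next((k for k in range(n) if kept[k]), n)
--     j = next((k for k in range(i, n) if not kept[k]), n)
--     intro = ' '.join(kept[i:j])
--     if len(intro) > 200:
--         intro = intro[:200].rsplit(' ', 1)[0] + '...'
--     return intro
-- ===== Notes on version B (the rewrite author's own statement) =====
-- stated objective: alternative
-- what changed: Replaces A's single stateful loop with a paragraph accumulator and break by a pipeline: filter out heading/YAML lines, locate the first contiguous non-empty block by two index searches, slice it out and join; truncation is the same rsplit rule.
import Mathlib
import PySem

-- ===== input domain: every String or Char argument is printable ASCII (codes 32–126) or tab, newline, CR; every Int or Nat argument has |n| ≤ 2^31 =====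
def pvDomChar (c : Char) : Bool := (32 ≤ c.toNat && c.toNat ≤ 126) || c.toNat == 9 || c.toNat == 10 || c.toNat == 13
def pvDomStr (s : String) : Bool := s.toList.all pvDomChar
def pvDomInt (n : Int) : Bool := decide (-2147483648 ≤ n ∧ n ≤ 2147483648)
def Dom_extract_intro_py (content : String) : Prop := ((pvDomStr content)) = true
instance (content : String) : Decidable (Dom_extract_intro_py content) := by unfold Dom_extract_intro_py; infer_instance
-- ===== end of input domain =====

-- B replaces A's stateful collect-and-break loop by a filter / index-search / slice / join pipeline (objective: alternative decomposition, same cost).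

-- ===== PORT A =====
-- shared truncation step: both Pythons end with the identical
-- "if len(intro) > 200: intro = intro[:200].rsplit(' ', 1)[0] + '...'".
-- rsplit(' ', 1)[0] is ported by hand (exact for the 1-char separator ' ' with maxsplit=1,
-- keeping piece 0): the prefix before the LAST space if there is one, else the whole string.
def pyTruncateIntro (intro : String) : String :=
  if 200 < PySem.Str.len intro then
    let t := PySem.Str.slice intro none (some 200)
    let r := PySem.Str.rfind t " "
    let head := if r = -1 then t else PySem.Str.slice t none (some r)
    String.ofList (head.toList ++ "...".toList)   -- '+' on str, kernel-transparent
  else intro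

-- A's for-loop over lines with accumulator `paragraph` and break; branches in Python's order.
def extractLoopA : List String → List String → List String
  | [], par => par
  | l :: ls, par =>
    if PySem.Str.startswith l "#" || PySem.Str.startswith l "---" then
      extractLoopA ls par
    else if PySem.Str.strip l ≠ "" ∧ par = [] then
      extractLoopA ls (par ++ [PySem.Str.strip l])
    else if par ≠ [] ∧ PySem.Str.strip l ≠ "" then
      extractLoopA ls (par ++ [PySem.Str.strip l])
    else if par ≠ [] ∧ PySem.Str.strip l = "" then
      par
    else
      extractLoopA ls par

def extract_intro_py (content : String) : String :=
  -- content.split('\n'): the separator is the literal "\n" ≠ "", so split? is always some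
  let lines := (PySem.Str.split? content "\n").getD []
  let paragraph := extractLoopA lines []
  pyTruncateIntro (PySem.Str.join " " paragraph)

-- ===== PORT B =====
def extract_intro_py_alt (content : String) : String :=
  let kept := (((PySem.Str.split? content "\n").getD []).filter
      (fun l => !(PySem.Str.startswith l "#" || PySem.Str.startswith l "---"))).map
      PySem.Str.strip
  -- next((k for k in range(n) if kept[k]), n): findIdx defaults to kept.length
  let i := kept.findIdx (fun s => s != "")
  let j := i + (kept.drop i).findIdx (fun s => s == "")
  let intro := PySem.Str.join " " (PySem.List.slice kept (some (i : Int)) (some (j : Int)))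
  pyTruncateIntro intro

-- ===== PRECONDITION & SPEC =====
def Spec_extract_intro_py (content : String) (out : String) : Prop := out = extract_intro_py_alt content
instance (content : String) (out : String) : Decidable (Spec_extract_intro_py content out) := by unfold Spec_extract_intro_py; infer_instance

-- ===== CLAIM (what is proved, stated in full; the proofs are below) =====
def Claim_equal_extract_intro_py : Prop := ∀ (content : String), Dom_extract_intro_py content → Spec_extract_intro_py content (extract_intro_py content)

-- ===== LEMMAS AND PROOFS =====

theorem take_findIdx_eq_takeWhile {α : Type} (p : α → Bool) (xs : List α) :
    xs.take (xs.findIdx p) = xs.takeWhile (fun a => !(p a)) := by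
  induction xs with
  | nil => rfl
  | cons x xs ih =>
    by_cases h : p x = true
    · simp [List.findIdx_cons, h]
    · simp only [Bool.not_eq_true] at h
      simp [List.findIdx_cons, h, ih]

theorem drop_findIdx_eq_dropWhile {α : Type} (p : α → Bool) (xs : List α) :
    xs.drop (xs.findIdx p) = xs.dropWhile (fun a => !(p a)) := by
  induction xs with
  | nil => rfl
  | cons x xs ih =>
    by_cases h : p x = true
    · simp [List.findIdx_cons, h]
    · simp only [Bool.not_eq_true] at h
      simp [List.findIdx_cons, h, ih]

-- collecting phase: once `paragraph` is non-empty, A appends the stripped kept lines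
-- until the first empty one, then breaks.
theorem extractLoopA_collect (ls : List String) :
    ∀ par : List String, par ≠ [] →
    extractLoopA ls par =
      par ++ (((ls.filter
        (fun l => !(PySem.Str.startswith l "#" || PySem.Str.startswith l "---"))).map
        PySem.Str.strip).takeWhile (fun s => s != "")) := by
  induction ls with
  | nil => intro par _; simp [extractLoopA]
  | cons l ls ih =>
    intro par hpar
    by_cases hk : (PySem.Str.startswith l "#" || PySem.Str.startswith l "---") = true
    · simp [Bool.or_eq_true] at hk
      rcases hk with h | h <;>
        simp [extractLoopA, h, ih par hpar]
    · simp [Bool.or_eq_true, not_or] at hk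
      by_cases hs : PySem.Str.strip l = ""
      · simp [extractLoopA, hk.1, hk.2, hs, hpar]
      · have := ih (par ++ [PySem.Str.strip l]) (by simp)
        simp [extractLoopA, hk.1, hk.2, hs, hpar, this]

-- seeking phase: with an empty accumulator, A's result is the first contiguous
-- non-empty block of the stripped kept lines.
theorem extractLoopA_seek (ls : List String) :
    extractLoopA ls [] =
      ((((ls.filter
        (fun l => !(PySem.Str.startswith l "#" || PySem.Str.startswith l "---"))).map
        PySem.Str.strip).dropWhile (fun s => s == "")).takeWhile (fun s => s != "")) := by
  induction ls with
  | nil => rfl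
  | cons l ls ih =>
    by_cases hk : (PySem.Str.startswith l "#" || PySem.Str.startswith l "---") = true
    · simp [Bool.or_eq_true] at hk
      rcases hk with h | h <;>
        simp [extractLoopA, h, ih]
    · simp [Bool.or_eq_true, not_or] at hk
      by_cases hs : PySem.Str.strip l = ""
      · simp [extractLoopA, hk.1, hk.2, hs, ih]
      · have hc := extractLoopA_collect ls [PySem.Str.strip l] (by simp)
        simp [extractLoopA, hk.1, hk.2, hs, hc]

-- ===== VERDICT (by name: the statement is the Claim_ definition above) =====
theorem extract_intro_py_spec : Claim_equal_extract_intro_py := by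
  intro content _
  unfold Spec_extract_intro_py
  simp only [extract_intro_py, extract_intro_py_alt]
  set kept := ((((PySem.Str.split? content "\n").getD []).filter
      (fun l => !(PySem.Str.startswith l "#" || PySem.Str.startswith l "---"))).map
      PySem.Str.strip) with hkept
  set i := kept.findIdx (fun s => s != "") with hi
  set d := (kept.drop i).findIdx (fun s => s == "") with hd
  have hslice : PySem.List.slice kept (some (i : Int)) (some ((i + d : Nat) : Int)) =
      (kept.dropWhile (fun s => s == "")).takeWhile (fun s => s != "") := by
    have ep1 : (fun (s : String) => !(s != "")) = (fun s => s == "") := by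
      funext s; cases h : s == "" <;> simp [bne, h]
    have ep2 : (fun (s : String) => !(s == "")) = (fun s => s != "") := by
      funext s; cases h : s == "" <;> simp [bne, h]
    rw [show ((i + d : Nat) : Int) = ((i : Int) + (d : Int)) by push_cast; ring]
    rw [PySem.List.slice_natCast_add]
    have hdrop : kept.drop i = kept.dropWhile (fun s => s == "") := by
      rw [hi, drop_findIdx_eq_dropWhile, ep1]
    rw [hd, take_findIdx_eq_takeWhile, ep2, hdrop]
  rw [extractLoopA_seek, ← hkept, ← hslice]
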